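-- pv_equiv track=rewrite | github.com/xVoidDevilx/Conc_Prog_Lang | Project3_SilasRodriguez_R11679913/Silas_Rodriguez_R11679913_final_project.py | generateChunkPairs
-- ===== SOURCE A (Python) =====
-- def generateChunkPairs(dim: int, process_count: int):
--     assert process_count <= dim**2, 'More Processes than work to do...'
--     # Calculate the cells per chunk & return the steps
--     cells_per_process = dim**2 // process_count
--     remaining_cells = dim**2 % process_count
--
--     chunks = []
--     start_index = 0
--     for process in range(process_count):
--         end_index = start_index + cells_per_process + (1 if process < remaining_cells else 0)
--         chunks.append((start_index, end_index))
--         start_index = end_index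
--
--     return set(chunks)
-- ===== SOURCE B (Python) =====
-- def generateChunkPairs(dim: int, process_count: int):
--     assert process_count <= dim**2, 'More Processes than work to do...'
--     # Closed form: each chunk boundary is computed independently, no running accumulator.
--     cells_per_process = dim**2 // process_count
--     remaining_cells = dim**2 % process_count
--
--     def start(p):
--         return p * cells_per_process + min(p, remaining_cells)
--
--     return {(start(p), start(p + 1)) for p in range(process_count)}
-- ===== Notes on version B (the rewrite author's own statement) =====
-- stated objective: simpler
-- what changed: Replaces the sequential loop carrying a running start_index with an independent closed-form boundary start(p) = p*q + min(p, r) and a set comprehension, so each pair is computed directly.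
import Mathlib
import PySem

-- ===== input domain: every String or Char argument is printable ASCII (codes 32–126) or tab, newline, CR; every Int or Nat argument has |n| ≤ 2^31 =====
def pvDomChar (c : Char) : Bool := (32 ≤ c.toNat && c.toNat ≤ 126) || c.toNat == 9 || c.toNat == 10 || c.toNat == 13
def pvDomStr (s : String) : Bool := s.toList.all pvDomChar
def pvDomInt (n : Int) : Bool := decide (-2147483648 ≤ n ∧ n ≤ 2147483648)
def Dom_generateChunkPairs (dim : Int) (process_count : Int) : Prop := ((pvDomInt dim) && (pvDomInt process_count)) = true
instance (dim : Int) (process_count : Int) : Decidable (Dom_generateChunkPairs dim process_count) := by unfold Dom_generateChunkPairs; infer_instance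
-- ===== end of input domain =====

-- B replaces A's running start_index accumulator with an independent closed-form chunk boundary (objective: simpler).

-- ===== PORT A =====
def generateChunkPairs (dim : Int) (process_count : Int) : List (Int × Int) :=
  let cells_per_process := PySem.Int.floordiv (dim ^ 2) process_count
  let remaining_cells := PySem.Int.mod (dim ^ 2) process_count
  let st :=
    (PySem.List.pyRange 0 process_count 1).foldl
      (fun (st : List (Int × Int) × Int) p =>
        let end_index := st.2 + cells_per_process + (if p < remaining_cells then 1 else 0)
        (st.1 ++ [(st.2, end_index)], end_index))
      ([], 0)
  PySem.Set.ofList st.1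

-- ===== PORT B =====
def generateChunkPairs_alt (dim : Int) (process_count : Int) : List (Int × Int) :=
  let cells_per_process := PySem.Int.floordiv (dim ^ 2) process_count
  let remaining_cells := PySem.Int.mod (dim ^ 2) process_count
  let start := fun (p : Int) => p * cells_per_process + min p remaining_cells
  -- set comprehension over range(process_count)
  PySem.Set.ofList ((PySem.List.pyRange 0 process_count 1).map (fun p => (start p, start (p + 1))))

-- ===== PRECONDITION & SPEC =====
-- A raises AssertionError when process_count > dim**2 and ZeroDivisionError when process_count == 0; exactly those are excluded.
def Pre_generateChunkPairs (dim : Int) (process_count : Int) : Prop :=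
  process_count ≠ 0 ∧ process_count ≤ dim ^ 2
instance (dim : Int) (process_count : Int) : Decidable (Pre_generateChunkPairs dim process_count) := by
  unfold Pre_generateChunkPairs; infer_instance

def pvWitness_generateChunkPairs : Int × Int := (3, 4)

def Spec_generateChunkPairs (dim : Int) (process_count : Int) (out : List (Int × Int)) : Prop := out = generateChunkPairs_alt dim process_count
instance (dim : Int) (process_count : Int) (out : List (Int × Int)) : Decidable (Spec_generateChunkPairs dim process_count out) := by unfold Spec_generateChunkPairs; infer_instance

-- ===== CLAIM (what is proved, stated in full; the proofs are below) =====
def Claim_equal_generateChunkPairs : Prop := ∀ (dim : Int) (process_count : Int), Dom_generateChunkPairs dim process_count → Pre_generateChunkPairs dim process_count → Spec_generateChunkPairs dim process_count (generateChunkPairs dim process_count)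

-- ===== LEMMAS AND PROOFS =====

-- Loop invariant: after folding over range(0, n), the chunk list is the closed-form map and
-- the carried start_index equals start(n) = n*q + min n r  (needs 0 ≤ r for the base case).
theorem generateChunkPairs_loop_eq (q r : Int) (hr : 0 ≤ r) (n : Nat) :
    ((PySem.List.pyRange 0 (n : Int) 1).foldl
      (fun (st : List (Int × Int) × Int) p =>
        let e := st.2 + q + (if p < r then 1 else 0)
        (st.1 ++ [(st.2, e)], e))
      ([], 0))
    = ((PySem.List.pyRange 0 (n : Int) 1).map
        (fun p => (p * q + min p r, (p + 1) * q + min (p + 1) r)),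
       (n : Int) * q + min (n : Int) r) := by
  induction n with
  | zero =>
    simp [PySem.List.pyRange_one_eq_nil (by omega : (0:Int) ≤ 0)]
    omega
  | succ m ih =>
    have h : ((m + 1 : Nat) : Int) = (m : Int) + 1 := by push_cast; ring
    rw [h, PySem.List.pyRange_one_succ_right (by positivity), List.foldl_append, List.map_append, ih]
    simp only [List.foldl_cons, List.foldl_nil, List.map_cons, List.map_nil]
    have hm : ((m : Int) + 1) * q = (m : Int) * q + q := by ring
    rw [Prod.mk.injEq]
    refine ⟨by congr 1; rw [hm]; split_ifs <;> simp <;> omega,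
            by rw [hm]; split_ifs <;> omega⟩

-- ===== VERDICT (by name: the statement is the Claim_ definition above) =====
theorem generateChunkPairs_spec : Claim_equal_generateChunkPairs := by
  intro dim pc _ hpre
  unfold Spec_generateChunkPairs generateChunkPairs generateChunkPairs_alt
  rcases lt_or_gt_of_ne hpre.1 with hneg | hpos
  · -- negative process_count: range is empty on both sides
    rw [PySem.List.pyRange_one_eq_nil (by omega : pc ≤ 0)]
    simp
  · -- positive process_count: closed-form invariant
    have hr : 0 ≤ PySem.Int.mod (dim ^ 2) pc := by
      rw [PySem.Int.mod_eq_emod_of_pos hpos]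
      exact Int.emod_nonneg _ (by omega)
    obtain ⟨n, rfl⟩ : ∃ n : Nat, pc = (n : Int) := ⟨pc.toNat, by omega⟩
    show PySem.Set.ofList
        (((PySem.List.pyRange 0 (n : Int) 1).foldl
          (fun (st : List (Int × Int) × Int) p =>
            let e := st.2 + PySem.Int.floordiv (dim ^ 2) (n : Int) +
              (if p < PySem.Int.mod (dim ^ 2) (n : Int) then 1 else 0)
            (st.1 ++ [(st.2, e)], e))
          ([], 0)).1)
      = PySem.Set.ofList ((PySem.List.pyRange 0 (n : Int) 1).map
          (fun p => (p * PySem.Int.floordiv (dim ^ 2) (n : Int) + min p (PySem.Int.mod (dim ^ 2) (n : Int)),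
            (p + 1) * PySem.Int.floordiv (dim ^ 2) (n : Int) + min (p + 1) (PySem.Int.mod (dim ^ 2) (n : Int)))))
    rw [generateChunkPairs_loop_eq _ _ hr n]
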